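-- pv_equiv track=rewrite | github.com/tmtmaj/Extract-dictionary-from-bilingual-alignment | ExtractTopNDict.py | line_dict
-- ===== SOURCE A (Python) =====
-- from collections import defaultdict, Counter
--
-- def line_dict(prepro_align, src_token, tgt_token):
--   # input:
--   # 1. prepro_alignment list (i.e. [[(23, 16), (0, 12), (4, 10), (22, 17), ..., (1, 9), (5, 2)], ..., [(5, 1), (1, 9), (5, 2), ..., (3,4), (32, 3)]])
--   # 2. tokenized source sentence list (i.e. [['올해', '87', '차', '를', '맞은', 'sc@@', 'e', '수련', '회', '는', '매년', '전국', '교회', '에서', '다음', '세대', '성도', '들', '이', '한자리', '에', '모이는', '여름철', '대표', '신앙', '축제', '다', '.'], ...] )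
--   # 3. tokenized target sentence list (i.e. ['the', 's@@', 'ce', 'retreat', ',', 'which', 'marks', 'its', '8@@', '7th', 'anniversary', 'this', 'year', ',', 'is', 'a', 'major', 'summer', 'religious', 'festival', 'where', 'the', 'next', 'generation', 'of', 'believers', 'gather', 'in', 'churches', 'across', 'the', 'country', 'every', 'year', '.'], ...] )
--   # output: list of per-line dictionary (i.e. [defaultdict(list, {'.': ['.'], '87': ['7th', '8@@'], 'sc@@': ['s@@', 'ce'], ...}), ..., defaultdict...] )
--   line_dict = []
--
--   for a, s, t in zip(prepro_align, src_token, tgt_token):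
--     align_list = [(s[a_[0]], t[a_[1]]) for a_ in a if a_[0] != -1000] #만약 set이나 list를 바로 dict으로 바꿔버리면 한 key에 대한 여러개의 values 중 하나만 뺴고 다 사라짐
--     temp_dict = defaultdict(list)
--     for (key, val) in align_list:
--       if val not in temp_dict[key]:
--         temp_dict[key].append(val)
--     line_dict.append(temp_dict)
--
--   return line_dict
-- ===== SOURCE B (Python) =====
-- from collections import defaultdict
--
-- def line_dict(prepro_align, src_token, tgt_token):
--   # Key-major rebuild: dedup the whole (src,tgt) pair stream once, then for each
--   # distinct source key collect its targets by a plain scan — no incremental dict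
--   # build and no per-key membership tests.
--   out = []
--   for a, s, t in zip(prepro_align, src_token, tgt_token):
--     align_list = [(s[a_[0]], t[a_[1]]) for a_ in a if a_[0] != -1000]
--     pairs = list(dict.fromkeys(align_list))
--     keys = list(dict.fromkeys(k for k, _ in pairs))
--     out.append(defaultdict(list, {k: [v for k2, v in pairs if k2 == k] for k in keys}))
--   return out
-- ===== Notes on version B (the rewrite author's own statement) =====
-- stated objective: alternative
-- what changed: Replaces A's incremental dict build with a per-pair membership test by a key-major rebuild: dedup the whole pair stream once with dict.fromkeys, extract the distinct keys, and for each key collect its targets by an unconditional scan of the deduped pairs.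
-- outside the precondition, e.g. on line_dict([[(5, 0)]], [['a']], [['b']]): A raises IndexError, B raises IndexError
import Mathlib
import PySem

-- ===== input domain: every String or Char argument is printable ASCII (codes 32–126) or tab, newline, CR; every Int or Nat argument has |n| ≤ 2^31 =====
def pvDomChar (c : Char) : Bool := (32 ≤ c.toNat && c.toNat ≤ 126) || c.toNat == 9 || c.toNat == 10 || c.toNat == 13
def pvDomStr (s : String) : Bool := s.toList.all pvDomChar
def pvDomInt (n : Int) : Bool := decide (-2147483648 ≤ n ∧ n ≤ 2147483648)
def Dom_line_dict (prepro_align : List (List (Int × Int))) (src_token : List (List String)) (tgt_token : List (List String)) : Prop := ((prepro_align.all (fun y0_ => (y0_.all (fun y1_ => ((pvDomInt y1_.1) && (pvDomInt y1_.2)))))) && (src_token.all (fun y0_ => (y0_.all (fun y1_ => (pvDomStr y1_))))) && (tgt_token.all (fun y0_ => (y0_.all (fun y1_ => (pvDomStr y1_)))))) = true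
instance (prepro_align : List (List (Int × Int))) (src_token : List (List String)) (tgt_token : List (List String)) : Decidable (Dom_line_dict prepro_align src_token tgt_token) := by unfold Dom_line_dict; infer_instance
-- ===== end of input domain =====

-- B rebuilds each line key-major: dedup the pair stream once, take the distinct keys,
-- and collect each key's targets by a plain scan (no incremental dict, no membership test).

-- ===== PORT A =====
-- shared by both ports: the identical comprehension
-- [(s[a_[0]], t[a_[1]]) for a_ in a if a_[0] != -1000]
-- (pyGet? none = IndexError, excluded by Pre_; .getD "" is only reached outside Pre_)
def pvAlignList (a : List (Int × Int)) (s t : List String) : List (String × String) :=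
  (a.filter (fun a_ => decide (a_.1 ≠ -1000))).map
    (fun a_ => ((PySem.List.pyGet? s a_.1).getD "", (PySem.List.pyGet? t a_.2).getD ""))

-- one iteration of A's inner loop: temp_dict[key] (defaultdict access materialises the
-- key with []), then 'if val not in temp_dict[key]: temp_dict[key].append(val)'
def pvAStep (d : PySem.Dict String (List String)) (p : String × String) :
    PySem.Dict String (List String) :=
  let d1 := if d.contains p.1 then d else d.insert p.1 []
  let vs := d1.getD p.1 []
  if p.2 ∈ vs then d1 else d1.insert p.1 (vs ++ [p.2])

def line_dict (prepro_align : List (List (Int × Int))) (src_token : List (List String)) (tgt_token : List (List String)) : List (List (String × List String)) :=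
  (prepro_align.zip (src_token.zip tgt_token)).foldl
    (fun acc x =>
      acc ++ [((pvAlignList x.1 x.2.1 x.2.2).foldl pvAStep PySem.Dict.empty).items])
    []

-- ===== PORT B =====
-- pairs = list(dict.fromkeys(align_list)); keys = list(dict.fromkeys(k for k,_ in pairs));
-- {k: [v for k2, v in pairs if k2 == k] for k in keys}
def line_dict_alt (prepro_align : List (List (Int × Int))) (src_token : List (List String)) (tgt_token : List (List String)) : List (List (String × List String)) :=
  (prepro_align.zip (src_token.zip tgt_token)).foldl
    (fun acc x =>
      let pairs := PySem.List.dedup (pvAlignList x.1 x.2.1 x.2.2)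
      let keys := PySem.List.dedup (pairs.map (·.1))
      acc ++ [keys.map (fun k => (k, (pairs.filter (fun p => p.1 == k)).map (·.2)))])
    []

-- ===== PRECONDITION & SPEC =====
-- Pre_ excludes exactly the inputs where some kept alignment pair indexes out of range
-- in its source or target sentence (Python IndexError).
def Pre_line_dict (prepro_align : List (List (Int × Int))) (src_token : List (List String)) (tgt_token : List (List String)) : Prop :=
  ((prepro_align.zip (src_token.zip tgt_token)).all (fun x =>
    x.1.all (fun p => p.1 == -1000 ||
      ((PySem.List.pyGet? x.2.1 p.1).isSome && (PySem.List.pyGet? x.2.2 p.2).isSome)))) = true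
instance (prepro_align : List (List (Int × Int))) (src_token : List (List String)) (tgt_token : List (List String)) : Decidable (Pre_line_dict prepro_align src_token tgt_token) := by unfold Pre_line_dict; infer_instance

def pvWitness_line_dict : (List (List (Int × Int))) × List (List String) × List (List String) :=
  ([[(0, 0), (0, 1), (-1000, 7)]], [["src"]], [["tgt", "tgt2"]])

def Spec_line_dict (prepro_align : List (List (Int × Int))) (src_token : List (List String)) (tgt_token : List (List String)) (out : List (List (String × List String))) : Prop := out = line_dict_alt prepro_align src_token tgt_token
instance (prepro_align : List (List (Int × Int))) (src_token : List (List String)) (tgt_token : List (List String)) (out : List (List (String × List String))) : Decidable (Spec_line_dict prepro_align src_token tgt_token out) := by unfold Spec_line_dict; infer_instance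

-- ===== CLAIM (what is proved, stated in full; the proofs are below) =====
def Claim_equal_line_dict : Prop := ∀ (prepro_align : List (List (Int × Int))) (src_token : List (List String)) (tgt_token : List (List String)), Dom_line_dict prepro_align src_token tgt_token → Pre_line_dict prepro_align src_token tgt_token → Spec_line_dict prepro_align src_token tgt_token (line_dict prepro_align src_token tgt_token)

-- ===== LEMMAS AND PROOFS =====

theorem pvAStep_getD_self (d : PySem.Dict String (List String)) (p : String × String) :
    (pvAStep d p).getD p.1 [] = PySem.Set.add (d.getD p.1 []) p.2 := by
  by_cases hc : d.contains p.1 = true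
  · by_cases hm : p.2 ∈ d.getD p.1 []
    · simp [pvAStep, hc, hm]
    · simp [pvAStep, hc, hm, PySem.Dict.getD_insert_self]
  · have hc' : d.contains p.1 = false := by simpa using hc
    have h0 : (d.insert p.1 []).getD p.1 [] = ([] : List String) :=
      PySem.Dict.getD_insert_self d p.1 [] []
    have hd0 : d.getD p.1 [] = ([] : List String) :=
      PySem.Dict.getD_of_not_contains d [] hc'
    simp [pvAStep, hc', h0, hd0, PySem.Dict.insert_insert_self,
      PySem.Dict.getD_insert_self, PySem.Set.add]

theorem pvAStep_getD_ne (d : PySem.Dict String (List String)) (p : String × String)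
    (k : String) (hne : k ≠ p.1) : (pvAStep d p).getD k [] = d.getD k [] := by
  by_cases hc : d.contains p.1 = true
  · by_cases hm : p.2 ∈ d.getD p.1 []
    · simp [pvAStep, hc, hm]
    · simp [pvAStep, hc, hm, PySem.Dict.getD_insert_of_ne _ _ _ hne]
  · have hc' : d.contains p.1 = false := by simpa using hc
    have h0 : (d.insert p.1 []).getD p.1 [] = ([] : List String) :=
      PySem.Dict.getD_insert_self d p.1 [] []
    simp [pvAStep, hc', h0, PySem.Dict.insert_insert_self,
      PySem.Dict.getD_insert_of_ne _ _ _ hne]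

theorem pvAStep_keys (d : PySem.Dict String (List String)) (p : String × String) :
    (pvAStep d p).keys = PySem.Set.add d.keys p.1 := by
  by_cases hc : d.contains p.1 = true
  · have hmem : p.1 ∈ d.keys := (PySem.Dict.contains_iff_mem_keys d p.1).mp hc
    by_cases hm : p.2 ∈ d.getD p.1 []
    · simp [pvAStep, hc, hm, PySem.Set.add_of_mem hmem]
    · simp [pvAStep, hc, hm, PySem.Dict.keys_insert_of_contains d _ hc,
        PySem.Set.add_of_mem hmem]
  · have hc' : d.contains p.1 = false := by simpa using hc
    have hmem : p.1 ∉ d.keys := fun h => by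
      simp [(PySem.Dict.contains_iff_mem_keys d p.1).mpr h] at hc'
    have h0 : (d.insert p.1 []).getD p.1 [] = ([] : List String) :=
      PySem.Dict.getD_insert_self d p.1 [] []
    simp [pvAStep, hc', h0, PySem.Dict.insert_insert_self,
      PySem.Dict.keys_insert_of_not_contains d _ hc', PySem.Set.add_of_not_mem hmem]

-- value of A's dict at key k: Set.update of the incoming value by the targets filed under k
theorem pvA_getD (al : List (String × String)) (d : PySem.Dict String (List String))
    (k : String) :
    (al.foldl pvAStep d).getD k [] =
      PySem.Set.update (d.getD k []) ((al.filter (fun p => p.1 == k)).map (·.2)) := by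
  induction al generalizing d with
  | nil => simp [PySem.Set.update]
  | cons p al ih =>
    rw [List.foldl_cons, ih]
    by_cases hpk : p.1 = k
    · subst hpk
      rw [pvAStep_getD_self]
      simp [PySem.Set.update_cons]
    · rw [pvAStep_getD_ne d p k (fun h => hpk h.symm)]
      simp [hpk]

-- keys of A's dict: first occurrences of the source keys, in order
theorem pvA_keys (al : List (String × String)) (d : PySem.Dict String (List String)) :
    (al.foldl pvAStep d).keys = PySem.Set.update d.keys (al.map (·.1)) := by
  induction al generalizing d with
  | nil => simp [PySem.Set.update]
  | cons p al ih =>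
    rw [List.foldl_cons, ih, pvAStep_keys, List.map_cons, PySem.Set.update_cons]

-- dedup commutes with a filter on the element value
theorem pvSet_ofList_filter {α : Type} [BEq α] [LawfulBEq α] (q : α → Bool) (l : List α) :
    (PySem.Set.ofList l).filter q = PySem.Set.ofList (l.filter q) := by
  induction l using List.reverseRecOn with
  | nil => rfl
  | append_singleton l x ih =>
    rw [List.filter_append, PySem.Set.ofList_append_singleton]
    by_cases hx : x ∈ l
    · rw [PySem.Set.add_of_mem ((PySem.Set.mem_ofList l x).mpr hx)]
      cases hq : q x
      · simp [hq, ih]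
      · have hxf : x ∈ l.filter q := List.mem_filter.mpr ⟨hx, hq⟩
        simp only [List.filter_cons, hq, List.filter_nil, if_true]
        rw [PySem.Set.ofList_append_singleton,
          PySem.Set.add_of_mem ((PySem.Set.mem_ofList _ x).mpr hxf), ih]
    · rw [PySem.Set.add_of_not_mem (fun h => hx ((PySem.Set.mem_ofList l x).mp h)),
        List.filter_append]
      cases hq : q x
      · simp [hq, ih]
      · have hxf : x ∉ l.filter q := fun h => hx (List.mem_filter.mp h).1
        simp only [List.filter_cons, hq, List.filter_nil, if_true]
        rw [PySem.Set.ofList_append_singleton,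
          PySem.Set.add_of_not_mem (fun h => hxf ((PySem.Set.mem_ofList _ x).mp h)), ih]

-- dedup after mapping over an already-deduped list = dedup after mapping the raw list
theorem pvSet_ofList_map_ofList {α β : Type} [BEq α] [LawfulBEq α] [BEq β] [LawfulBEq β]
    (f : α → β) (l : List α) :
    PySem.Set.ofList ((PySem.Set.ofList l).map f) = PySem.Set.ofList (l.map f) := by
  induction l using List.reverseRecOn with
  | nil => rfl
  | append_singleton l x ih =>
    rw [List.map_append, List.map_cons, List.map_nil,
      PySem.Set.ofList_append_singleton, PySem.Set.ofList_append_singleton]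
    by_cases hx : x ∈ l
    · rw [PySem.Set.add_of_mem ((PySem.Set.mem_ofList l x).mpr hx), ih,
        PySem.Set.add_of_mem ((PySem.Set.mem_ofList _ (f x)).mpr
          (List.mem_map_of_mem hx))]
    · rw [PySem.Set.add_of_not_mem (fun h => hx ((PySem.Set.mem_ofList l x).mp h)),
        List.map_append, List.map_cons, List.map_nil,
        PySem.Set.ofList_append_singleton, ih]

-- mapping snd commutes with dedup when every pair carries the same first component
theorem pvSet_ofList_map_snd {β : Type} [BEq β] [LawfulBEq β] (k : String)
    (l : List (String × β)) (h : ∀ p ∈ l, p.1 = k) :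
    (PySem.Set.ofList l).map (·.2) = PySem.Set.ofList (l.map (·.2)) := by
  induction l using List.reverseRecOn with
  | nil => rfl
  | append_singleton l x ih =>
    have hx1 : x.1 = k := h x (by simp)
    have h' : ∀ p ∈ l, p.1 = k := fun p hp => h p (by simp [hp])
    rw [List.map_append, List.map_cons, List.map_nil,
      PySem.Set.ofList_append_singleton, PySem.Set.ofList_append_singleton]
    by_cases hx : x ∈ l
    · rw [PySem.Set.add_of_mem ((PySem.Set.mem_ofList l x).mpr hx), ih h',
        PySem.Set.add_of_mem ((PySem.Set.mem_ofList _ x.2).mpr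
          (List.mem_map_of_mem hx))]
    · have hx2 : x.2 ∉ l.map (·.2) := by
        intro hm
        rcases List.mem_map.mp hm with ⟨p, hp, hpe⟩
        refine hx ?_
        have : p = x := Prod.ext (by rw [h' p hp, hx1]) hpe
        rwa [this] at hp
      rw [PySem.Set.add_of_not_mem (fun hm => hx ((PySem.Set.mem_ofList l x).mp hm)),
        PySem.Set.add_of_not_mem (fun hm =>
          hx2 ((PySem.Set.mem_ofList _ x.2).mp hm)),
        List.map_append, List.map_cons, List.map_nil, ih h']

-- one line of A equals one line of B
theorem pvLine_eq (al : List (String × String)) :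
    (al.foldl pvAStep PySem.Dict.empty).items =
      (PySem.List.dedup ((PySem.List.dedup al).map (·.1))).map
        (fun k => (k, ((PySem.List.dedup al).filter (fun p => p.1 == k)).map (·.2))) := by
  have hAkeys : (al.foldl pvAStep PySem.Dict.empty).keys
      = PySem.Set.ofList (al.map (·.1)) := by
    rw [pvA_keys]; simp [PySem.Set.update_nil_left]
  have hAnodup : (al.foldl pvAStep PySem.Dict.empty).keys.Nodup := by
    rw [hAkeys]; exact PySem.Set.nodup_ofList _
  rw [PySem.Dict.items_eq_map_keys _ hAnodup [], hAkeys]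
  simp only [PySem.List.dedup_eq_ofList, pvSet_ofList_map_ofList]
  refine List.map_congr_left ?_
  intro k hk
  rw [pvA_getD, pvSet_ofList_filter,
    pvSet_ofList_map_snd k _ (fun p hp => by
      exact eq_of_beq (List.mem_filter.mp hp).2)]
  simp [PySem.Set.update_nil_left]

-- ===== VERDICT (by name: the statement is the Claim_ definition above) =====
theorem line_dict_spec : Claim_equal_line_dict := by
  intro prepro_align src_token tgt_token _ _
  unfold Spec_line_dict line_dict line_dict_alt
  induction (prepro_align.zip (src_token.zip tgt_token)) using List.reverseRecOn with
  | nil => rfl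
  | append_singleton l x ih =>
    rw [List.foldl_append, List.foldl_append, List.foldl_cons, List.foldl_cons,
      List.foldl_nil, List.foldl_nil, ih, pvLine_eq]
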